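-- pv_equiv track=rewrite | github.com/posl/comment_recommendation | script/mod_gen/4_time/ja/129_B/9.py | calc_diff
-- ===== SOURCE A (Python) =====
-- def calc_diff(n, w):
--     diff = 10000
--     for i in range(1, n):
--         s1 = sum(w[0:i])
--         s2 = sum(w[i:n])
--         if diff > abs(s1 - s2):
--             diff = abs(s1 - s2)
--     return diff
-- ===== SOURCE B (Python) =====
-- def calc_diff(n, w):
--     total = sum(w[:n])
--     left = 0
--     best = 10000
--     for i in range(1, n):
--         left += w[i - 1]
--         best = min(best, abs(2 * left - total))
--     return best
-- ===== Notes on version B (the rewrite author's own statement) =====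
-- stated objective: faster
-- what changed: Replaces the per-split re-summation of both slices (quadratic) with one precomputed total and a running prefix sum, comparing |2*left - total| per split; Pre_ excludes only n >= len(w)+2 (the count overstates the data), where A silently treats the missing tail as empty while B's w[i-1] raises IndexError.
-- outside the precondition, e.g. on calc_diff(5, [1, 2]): A returns 1, B raises IndexError
import Mathlib
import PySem

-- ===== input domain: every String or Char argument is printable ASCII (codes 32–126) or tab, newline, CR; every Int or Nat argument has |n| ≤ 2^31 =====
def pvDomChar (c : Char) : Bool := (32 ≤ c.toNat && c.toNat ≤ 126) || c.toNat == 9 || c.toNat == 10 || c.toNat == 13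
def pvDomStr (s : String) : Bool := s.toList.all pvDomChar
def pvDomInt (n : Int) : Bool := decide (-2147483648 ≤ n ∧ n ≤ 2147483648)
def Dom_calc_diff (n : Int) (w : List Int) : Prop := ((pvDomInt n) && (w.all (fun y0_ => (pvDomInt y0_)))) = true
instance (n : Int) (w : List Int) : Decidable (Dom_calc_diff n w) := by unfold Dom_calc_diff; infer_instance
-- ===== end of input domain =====

-- B replaces A's per-split re-summation of both slices (O(n^2)) by one precomputed
-- total and a running prefix sum (O(n)).

-- ===== PORT A =====
-- loop body of A: recompute both slice sums for split point i, keep the minimum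
def calcDiffStepA (n : Int) (w : List Int) (diff i : Int) : Int :=
  let s1 := (PySem.List.slice w (some 0) (some i)).sum
  let s2 := (PySem.List.slice w (some i) (some n)).sum
  if diff > |s1 - s2| then |s1 - s2| else diff

def calc_diff (n : Int) (w : List Int) : Int :=
  (PySem.List.pyRange 1 n 1).foldl (calcDiffStepA n w) 10000

-- ===== PORT B =====
-- loop body of B: state (best, left); extend the running prefix sum, compare |2*left - total|.
-- Python's w[i-1] raises IndexError out of range — exactly the inputs Pre_ excludes —
-- so pyGetD's default is never taken inside Pre_.
def calcDiffStepB (w : List Int) (total : Int) (p : Int × Int) (i : Int) : Int × Int :=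
  let left := p.2 + PySem.List.pyGetD w (i - 1) 0
  (min p.1 |2 * left - total|, left)

def calc_diff_alt (n : Int) (w : List Int) : Int :=
  ((PySem.List.pyRange 1 n 1).foldl
    (calcDiffStepB w (PySem.List.slice w none (some n)).sum) (10000, 0)).1

-- ===== PRECONDITION & SPEC =====
-- Pre_ excludes exactly n ≥ len(w)+2, where the count overstates the data: there A
-- silently treats the missing tail as an empty slice while B's w[i-1] raises IndexError.
def Pre_calc_diff (n : Int) (w : List Int) : Prop := n ≤ (w.length : Int) + 1
instance (n : Int) (w : List Int) : Decidable (Pre_calc_diff n w) := by unfold Pre_calc_diff; infer_instance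
def pvWitness_calc_diff : Int × List Int := (3, [1, 2, 4])

def Spec_calc_diff (n : Int) (w : List Int) (out : Int) : Prop := out = calc_diff_alt n w
instance (n : Int) (w : List Int) (out : Int) : Decidable (Spec_calc_diff n w out) := by unfold Spec_calc_diff; infer_instance

-- ===== CLAIM (what is proved, stated in full; the proofs are below) =====
def Claim_equal_calc_diff : Prop := ∀ (n : Int) (w : List Int), Dom_calc_diff n w → Pre_calc_diff n w → Spec_calc_diff n w (calc_diff n w)

-- ===== LEMMAS AND PROOFS =====

-- s1 of A is the prefix sum
lemma sliceSum_prefix (w : List Int) (a : Int) (h0 : 0 ≤ a) :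
    (PySem.List.slice w (some 0) (some a)).sum = (w.take a.toNat).sum := by
  rw [PySem.List.slice_zero_start, PySem.List.slice_to w h0]

-- the two slice sums of a split add up to the (truncated) total
lemma sliceSum_split (w : List Int) (a n : Int) (h0 : 0 ≤ a) (h : a ≤ n) :
    (PySem.List.slice w (some a) (some n)).sum
      = (w.take n.toNat).sum - (w.take a.toNat).sum := by
  rw [PySem.List.slice_toNat w h0 (le_trans h0 h)]
  have hle : a.toNat ≤ n.toNat := Int.toNat_le_toNat h
  have : w.take n.toNat = w.take a.toNat ++ (w.drop a.toNat).take (n.toNat - a.toNat) := by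
    rw [← List.take_add]
    congr 1
    omega
  rw [this, List.sum_append]
  ring

-- B's prefix-sum update computes the next prefix sum (the index is in range under Pre_)
lemma left_step (w : List Int) (a : Int) (h1 : 1 ≤ a) (h2 : a - 1 < (w.length : Int)) :
    (w.take (a - 1).toNat).sum + PySem.List.pyGetD w (a - 1) 0 = (w.take a.toNat).sum := by
  have hj : a.toNat = (a - 1).toNat + 1 := by omega
  have hlt : (a - 1).toNat < w.length := by omega
  rw [PySem.List.pyGetD_of_nonneg w 0 (by omega), List.getD_eq_getElem w 0 hlt]
  rw [hj, List.sum_take_succ w _ hlt]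

-- one step of A equals one step of B on corresponding states
lemma step_eq (n : Int) (w : List Int) (a diff : Int) (h1 : 1 ≤ a) (h2 : a < n)
    (hn : n ≤ (w.length : Int) + 1) :
    calcDiffStepB w ((w.take n.toNat).sum) (diff, (w.take (a - 1).toNat).sum) a
      = (calcDiffStepA n w diff a, (w.take a.toNat).sum) := by
  simp only [calcDiffStepB, calcDiffStepA]
  rw [left_step w a h1 (by omega),
      sliceSum_prefix w a (by omega),
      sliceSum_split w a n (by omega) (by omega)]
  rw [Prod.mk.injEq]
  refine ⟨?_, rfl⟩
  have harg : 2 * (w.take a.toNat).sum - (w.take n.toNat).sum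
      = (w.take a.toNat).sum - ((w.take n.toNat).sum - (w.take a.toNat).sum) := by ring
  rw [harg]
  rcases le_or_gt diff |(w.take a.toNat).sum - ((w.take n.toNat).sum - (w.take a.toNat).sum)| with h | h
  · rw [min_eq_left h, if_neg (by omega)]
  · rw [min_eq_right (le_of_lt h), if_pos h]

-- the whole loops agree, given the prefix-sum invariant
lemma loop_eq (w : List Int) (n : Int) (hn : n ≤ (w.length : Int) + 1) (k : ℕ) :
    ∀ (a diff : Int), 1 ≤ a → (n - a).toNat = k →
      (PySem.List.pyRange a n 1).foldl (calcDiffStepA n w) diff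
        = ((PySem.List.pyRange a n 1).foldl
            (calcDiffStepB w ((w.take n.toNat).sum))
            (diff, (w.take (a - 1).toNat).sum)).1 := by
  induction k with
  | zero =>
      intro a diff h1 hk
      rw [PySem.List.pyRange_one_eq_nil (by omega)]
      simp
  | succ k ih =>
      intro a diff h1 hk
      have h2 : a < n := by omega
      rw [PySem.List.pyRange_one_cons h2]
      simp only [List.foldl_cons]
      rw [step_eq n w a diff h1 h2 hn]
      have : (w.take a.toNat).sum = (w.take ((a + 1) - 1).toNat).sum := by norm_num
      rw [this, ih (a + 1) _ (by omega) (by omega)]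

-- ===== VERDICT (by name: the statement is the Claim_ definition above) =====
theorem calc_diff_spec : Claim_equal_calc_diff := by
  intro n w _ hpre
  unfold Pre_calc_diff at hpre
  unfold Spec_calc_diff calc_diff calc_diff_alt
  by_cases hn : 0 ≤ n
  · rw [PySem.List.slice_to w hn]
    have h := loop_eq w n hpre (n - 1).toNat 1 10000 (by omega) rfl
    simpa using h
  · rw [PySem.List.pyRange_one_eq_nil (by omega)]
    simp
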